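-- pv_equiv track=rewrite | github.com/Chinhczuc/eeeeeeeeeeeeeeeeeeeeeeeee | billiards_ai_package/overlay_renderer.py | _find_target_ball
-- ===== SOURCE A (Python) =====
-- def _find_target_ball(balls, target_type):
--     """Find the target ball from detected balls"""
--     for ball in balls:
--         if ball.get('type') == target_type:
--             return ball
--
--     # If target not found, return the first non-cue ball
--     for ball in balls:
--         if ball.get('type') != 'cue':
--             return ball
--
--     return None
-- ===== SOURCE B (Python) =====
-- def _find_target_ball(balls, target_type):
--     """Find the target ball: exact type match first, else first non-cue ball (one pass)."""
--     fallback = None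
--     for ball in balls:
--         if ball.get('type') == target_type:
--             return ball
--         if fallback is None and ball.get('type') != 'cue':
--             fallback = ball
--     return fallback
-- ===== Notes on version B (the rewrite author's own statement) =====
-- stated objective: alternative
-- what changed: A's two sequential scans (first for a type match, then for the first non-cue ball) are merged into one single pass that returns on a type match and keeps the first non-cue ball in a fallback accumulator.
import Mathlib
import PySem

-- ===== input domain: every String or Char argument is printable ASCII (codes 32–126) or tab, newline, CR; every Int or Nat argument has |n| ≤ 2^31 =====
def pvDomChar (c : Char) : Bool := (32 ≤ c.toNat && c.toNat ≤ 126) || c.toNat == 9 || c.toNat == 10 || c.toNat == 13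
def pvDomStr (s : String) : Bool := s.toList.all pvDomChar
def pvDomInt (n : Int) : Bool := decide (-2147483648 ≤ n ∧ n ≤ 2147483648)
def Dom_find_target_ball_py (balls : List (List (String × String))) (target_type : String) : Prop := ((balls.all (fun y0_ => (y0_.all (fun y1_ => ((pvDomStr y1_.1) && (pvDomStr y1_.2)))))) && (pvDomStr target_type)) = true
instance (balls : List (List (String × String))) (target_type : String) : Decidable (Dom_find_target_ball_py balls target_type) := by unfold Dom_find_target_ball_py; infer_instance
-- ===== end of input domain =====

-- B merges A's two sequential scans into one pass with a first-non-cue fallback accumulator (alternative decomposition, same cost).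


-- ===== PORT A =====
-- first loop: return the first ball whose 'type' equals target_type
def pvScanType (balls : List (List (String × String))) (target_type : String) : Option (List (String × String)) :=
  match balls with
  | [] => none
  | b :: rest =>
    if (PySem.Dict.mk b).get? "type" == some target_type then some b
    else pvScanType rest target_type

-- second loop: return the first ball whose 'type' is not 'cue' (a missing 'type' counts as non-cue)
def pvScanNonCue (balls : List (List (String × String))) : Option (List (String × String)) :=
  match balls with
  | [] => none
  | b :: rest =>
    if (PySem.Dict.mk b).get? "type" != some "cue" then some b
    else pvScanNonCue rest

def find_target_ball_py (balls : List (List (String × String))) (target_type : String) : Option (List (String × String)) :=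
  match pvScanType balls target_type with
  | some b => some b
  | none => pvScanNonCue balls

-- ===== PORT B =====
-- single pass: return on a type match, remember the first non-cue ball as fallback
def pvAltLoop (balls : List (List (String × String))) (target_type : String) (fallback : Option (List (String × String))) : Option (List (String × String)) :=
  match balls with
  | [] => fallback
  | b :: rest =>
    if (PySem.Dict.mk b).get? "type" == some target_type then some b
    else pvAltLoop rest target_type
      (if fallback == none && (PySem.Dict.mk b).get? "type" != some "cue" then some b else fallback)

def find_target_ball_py_alt (balls : List (List (String × String))) (target_type : String) : Option (List (String × String)) :=
  pvAltLoop balls target_type none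

-- ===== PRECONDITION & SPEC =====
def Spec_find_target_ball_py (balls : List (List (String × String))) (target_type : String) (out : Option (List (String × String))) : Prop := out = find_target_ball_py_alt balls target_type
instance (balls : List (List (String × String))) (target_type : String) (out : Option (List (String × String))) : Decidable (Spec_find_target_ball_py balls target_type out) := by unfold Spec_find_target_ball_py; infer_instance

-- ===== CLAIM (what is proved, stated in full; the proofs are below) =====
def Claim_equal_find_target_ball_py : Prop := ∀ (balls : List (List (String × String))) (target_type : String), Dom_find_target_ball_py balls target_type → Spec_find_target_ball_py balls target_type (find_target_ball_py balls target_type)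

-- ===== LEMMAS AND PROOFS =====
-- loop invariant: the one-pass loop with fallback fb equals "type match, else fb, else first non-cue"
theorem pvAltLoop_eq (balls : List (List (String × String))) (target_type : String)
    (fb : Option (List (String × String))) :
    pvAltLoop balls target_type fb =
      match pvScanType balls target_type with
      | some b => some b
      | none => match fb with
        | some f => some f
        | none => pvScanNonCue balls := by
  induction balls generalizing fb with
  | nil => cases fb <;> simp [pvAltLoop, pvScanType, pvScanNonCue]
  | cons b rest ih =>
    simp only [pvAltLoop, pvScanType, pvScanNonCue]
    split_ifs with h1 h2 <;> simp [ih] <;> cases fb <;> simp_all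

-- ===== VERDICT (by name: the statement is the Claim_ definition above) =====
theorem find_target_ball_py_spec : Claim_equal_find_target_ball_py := by
  intro balls target_type _
  unfold Spec_find_target_ball_py find_target_ball_py find_target_ball_py_alt
  rw [pvAltLoop_eq]
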